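-- pv_equiv track=rewrite | github.com/dudeperf3ct/aoc | 2024/day7/utils.py | eval_numbers
-- ===== SOURCE A (Python) =====
-- from collections import deque
--
-- class TreeNode:
--     def __init__(self, num, index):
--         self.num = num
--         self.index = index
--
-- def eval_numbers(output, numbers, use_concat=False):
--     root_node = TreeNode(num=numbers[0], index=0)
--     queue = deque([root_node])
--     while queue:
--         curr_node = queue.popleft()
--         if curr_node.index == len(numbers) - 1:
--             if curr_node.num == output:
--                 return output
--             continue
--
--         next_index = curr_node.index + 1
--         next_num = numbers[next_index]
--
--         add_value = curr_node.num + next_num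
--         queue.append(TreeNode(num=add_value, index=next_index))
--
--         mul_value = curr_node.num * next_num
--         queue.append(TreeNode(num=mul_value, index=next_index))
--
--         if use_concat:
--             concat_value = int(f"{curr_node.num}{next_num}")
--             queue.append(TreeNode(num=concat_value, index=next_index))
--     return 0
-- ===== SOURCE B (Python) =====
-- def eval_numbers(output, numbers, use_concat=False):
--     def reachable(acc, i):
--         if i == len(numbers) - 1:
--             return acc == output
--         nxt = numbers[i + 1]
--         return (reachable(acc + nxt, i + 1)
--                 or reachable(acc * nxt, i + 1)
--                 or (use_concat and reachable(int(f"{acc}{nxt}"), i + 1)))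
--     return output if reachable(numbers[0], 0) else 0
-- ===== Notes on version B (the rewrite author's own statement) =====
-- stated objective: simpler
-- what changed: Replaces the explicit BFS (deque of TreeNode objects walked level by level) with a direct short-circuiting recursive DFS over the remaining numbers; the TreeNode class and queue disappear.
-- outside the precondition, e.g. on eval_numbers(5, [], False): A raises IndexError, B raises IndexError; on eval_numbers(7, [3, -4], True): A raises ValueError, B raises ValueError
import Mathlib
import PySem

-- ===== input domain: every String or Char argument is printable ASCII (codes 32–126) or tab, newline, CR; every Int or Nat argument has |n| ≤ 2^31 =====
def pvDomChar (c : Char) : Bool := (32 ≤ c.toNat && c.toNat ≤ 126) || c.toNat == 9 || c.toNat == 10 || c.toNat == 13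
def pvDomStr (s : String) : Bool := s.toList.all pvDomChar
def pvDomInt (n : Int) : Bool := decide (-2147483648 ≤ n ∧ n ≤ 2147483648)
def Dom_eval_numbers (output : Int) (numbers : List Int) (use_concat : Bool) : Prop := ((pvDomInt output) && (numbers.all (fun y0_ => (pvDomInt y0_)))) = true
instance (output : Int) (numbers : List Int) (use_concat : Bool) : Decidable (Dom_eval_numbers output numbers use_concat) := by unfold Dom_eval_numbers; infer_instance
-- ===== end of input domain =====

-- B replaces A's explicit BFS (deque of TreeNode) with a direct recursive DFS with
-- short-circuiting; equivalence of the RETURN values is what is proved.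

-- shared helper for Python's int(f"{a}{b}"): exact whenever the parse succeeds
-- (inside Pre_ the right operand is ≥ 0, so it always succeeds; the .getD 0 is unreachable there)
def pyConcat (a b : Int) : Int :=
  (PySem.Int.ofStr? (PySem.Int.toStr a ++ PySem.Int.toStr b)).getD 0

-- ===== PORT A =====
-- A's BFS loop over a deque of TreeNode(num, index); a node's index is represented
-- here by the remaining suffix of `numbers` (numbers[index+1:]), so the loop is the
-- obvious recursion on the queue; children are appended at the back in A's order.
def bfsA (output : Int) (use_concat : Bool) : List (Int × List Int) → Int
  | [] => 0
  | (num, rest) :: queue =>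
    match rest with
    | [] => if num = output then output else bfsA output use_concat queue
    | next_num :: rest' =>
      bfsA output use_concat
        (queue ++ [(num + next_num, rest'), (num * next_num, rest')] ++
          (if use_concat then [(pyConcat num next_num, rest')] else []))
  termination_by q => (q.map fun p => 4 ^ (p.2.length + 1)).sum
  decreasing_by
  all_goals simp [List.sum_append]
  all_goals (try split) <;> simp [pow_succ] <;>
    (have h1 : 1 ≤ 4 ^ List.length rest' := Nat.one_le_two_pow.trans (Nat.pow_le_pow_left (by norm_num) _)) <;> omega

def eval_numbers (output : Int) (numbers : List Int) (use_concat : Bool) : Int :=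
  match numbers with
  | [] => 0      -- Python raises IndexError here; excluded by Pre_
  | n0 :: tl => bfsA output use_concat [(n0, tl)]

-- ===== PORT B =====
def reachB (output : Int) (use_concat : Bool) (acc : Int) : List Int → Bool
  | [] => acc = output
  | nxt :: rest =>
    reachB output use_concat (acc + nxt) rest ||
    reachB output use_concat (acc * nxt) rest ||
    (use_concat && reachB output use_concat (pyConcat acc nxt) rest)

def eval_numbers_alt (output : Int) (numbers : List Int) (use_concat : Bool) : Int :=
  match numbers with
  | [] => 0      -- Python raises IndexError here; excluded by Pre_
  | n0 :: tl => if reachB output use_concat n0 tl then output else 0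

-- ===== PRECONDITION & SPEC =====
-- Pre_ excludes exactly the inputs where A raises: the empty list (IndexError on
-- numbers[0]) and, with use_concat, a negative element after the first (the f-string
-- would then contain an inner '-', so int(...) raises ValueError before A can return).
def Pre_eval_numbers (output : Int) (numbers : List Int) (use_concat : Bool) : Prop :=
  numbers ≠ [] ∧ (use_concat = true → ∀ x ∈ numbers.tail, 0 ≤ x)
instance (output : Int) (numbers : List Int) (use_concat : Bool) : Decidable (Pre_eval_numbers output numbers use_concat) := by unfold Pre_eval_numbers; infer_instance

def pvWitness_eval_numbers : Int × List Int × Bool := (29, [2, 3, 5], true)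

def Spec_eval_numbers (output : Int) (numbers : List Int) (use_concat : Bool) (out : Int) : Prop := out = eval_numbers_alt output numbers use_concat
instance (output : Int) (numbers : List Int) (use_concat : Bool) (out : Int) : Decidable (Spec_eval_numbers output numbers use_concat out) := by unfold Spec_eval_numbers; infer_instance

-- ===== CLAIM (what is proved, stated in full; the proofs are below) =====
def Claim_equal_eval_numbers : Prop := ∀ (output : Int) (numbers : List Int) (use_concat : Bool), Dom_eval_numbers output numbers use_concat → Pre_eval_numbers output numbers use_concat → Spec_eval_numbers output numbers use_concat (eval_numbers output numbers use_concat)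

-- ===== LEMMAS AND PROOFS =====

-- The BFS over any queue returns `output` iff some queued state can reach `output`, else 0.
theorem bfsA_eq_any (output : Int) (use_concat : Bool) (q : List (Int × List Int)) :
    bfsA output use_concat q =
      (if q.any (fun p => reachB output use_concat p.1 p.2) then output else 0) := by
  fun_induction bfsA output use_concat q with
  | case1 => simp
  | case2 queue => simp [reachB]
  | case3 num queue h ih =>
    rw [ih]
    cases hq : queue.any (fun p => reachB output use_concat p.1 p.2) <;>
      simp [reachB, hq, h]
  | case4 num queue next_num rest' ih =>
    simp only [dite_eq_ite] at ih ⊢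
    rw [ih]
    have : ((queue ++ [(num + next_num, rest'), (num * next_num, rest')] ++
          if use_concat = true then [(pyConcat num next_num, rest')] else []).any
            fun p => reachB output use_concat p.1 p.2) =
        (((num, next_num :: rest') :: queue).any fun p => reachB output use_concat p.1 p.2) := by
      cases use_concat <;>
        simp [reachB, List.any_append, Bool.or_comm, Bool.or_assoc, Bool.or_left_comm]
    simp only [this]

-- ===== VERDICT (by name: the statement is the Claim_ definition above) =====
theorem eval_numbers_spec : Claim_equal_eval_numbers := by
  intro output numbers use_concat _ _
  cases numbers with
  | nil => rfl
  | cons n0 tl =>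
    show eval_numbers _ _ _ = _
    simp only [eval_numbers, eval_numbers_alt]
    rw [bfsA_eq_any]; simp
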